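-- pv_equiv track=rewrite | github.com/maria-j-k/library_v2 | scripts/parsers.py | strip_invalid
-- ===== SOURCE A (Python) =====
-- def valid_chars(char):
--     allowed_chars = [' ', '\'', '-']
--     return char.isalpha() or char in allowed_chars
--
-- def strip_invalid(term):
--     if term.count('-'):
--         if len(term) == term.count('-'):
--             return ''
--         elif term.count('-') == 1:
--             return ''.join(filter(valid_chars, term)).strip()
--         else:
--             term = [char for char in term]
--             ind = term.index('-')
--             while ind+1 < len(term):
--                 if not term[ind+1].isalpha():
--                     del term[ind+1]
--                 elif term[ind+1].isalpha():
--                     try: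
--                         ind = term.index('-', ind+1)
--                     except ValueError:
--                         break
--     return ''.join(filter(valid_chars, term)).strip()
-- ===== SOURCE B (Python) =====
-- def strip_invalid(term):
--     n = term.count('-')
--     if n and n == len(term):
--         return ''
--     if n >= 2:
--         # one pass: after a kept '-', drop characters until the next alphabetic one
--         kept = []
--         skipping = False
--         for ch in term:
--             if skipping:
--                 if ch.isalpha():
--                     skipping = False
--                 else:
--                     continue
--             if ch == '-':
--                 skipping = True
--             kept.append(ch)
--         term = kept
--     return ''.join(c for c in term if c.isalpha() or c in " '-").strip()
-- ===== Notes on version B (the rewrite author's own statement) =====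
-- stated objective: faster
-- what changed: A's repeated list.index/del while-loop over a mutable char list is replaced by a single left-to-right pass that skips non-alphabetic characters after each kept hyphen, followed by the same filter+strip.
import Mathlib
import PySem

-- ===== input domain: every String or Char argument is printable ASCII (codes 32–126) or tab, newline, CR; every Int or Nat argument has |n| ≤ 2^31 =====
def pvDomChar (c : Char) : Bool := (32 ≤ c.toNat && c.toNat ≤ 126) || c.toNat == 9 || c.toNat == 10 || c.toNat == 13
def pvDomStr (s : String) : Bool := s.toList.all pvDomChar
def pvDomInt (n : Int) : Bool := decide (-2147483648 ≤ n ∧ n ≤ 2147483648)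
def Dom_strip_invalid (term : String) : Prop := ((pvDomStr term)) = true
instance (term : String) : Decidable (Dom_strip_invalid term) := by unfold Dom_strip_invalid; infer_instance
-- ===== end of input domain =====

-- B replaces A's quadratic while-loop of list.index/del with one linear pass that skips
-- non-alphabetic characters after each kept hyphen (objective: faster, asymptotic).

-- ===== PORT A =====
-- valid_chars(char): char.isalpha() or char in [' ', "'", '-']
def pvValid (c : Char) : Bool :=
  PySem.Chars.isalpha c || [' ', '\'', '-'].contains c

-- term.index('-', start): Python list.index(v, start) = start + first index of v in term[start:]
-- (raises ValueError = none when absent) — hand-ported, exact.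
def pvIndexFrom (l : List Char) (v : Char) (s : Nat) : Option Nat :=
  (PySem.List.index? (l.drop s) v).map (· + s)

-- the while-loop: del term[ind+1] while non-alpha, else jump ind to the next '-' (break if none)
def pvLoopA (l : List Char) (ind : Nat) : List Char :=
  if h : ind + 1 < l.length then
    if PySem.Chars.isalpha l[ind + 1] = false then
      pvLoopA (l.eraseIdx (ind + 1)) ind
    else
      match hidx : pvIndexFrom l '-' (ind + 1) with
      | some j => pvLoopA l j
      | none => l
  else l
termination_by l.length - ind
decreasing_by
  · have := List.length_eraseIdx_of_lt (by omega : ind + 1 < l.length)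
    omega
  · obtain ⟨k, hk, rfl⟩ := Option.map_eq_some_iff.mp hidx
    obtain ⟨hlt, -, -⟩ := PySem.List.getElem_of_index?_eq_some hk
    simp [List.length_drop] at hlt
    omega

-- ''.join(filter(valid_chars, chars)).strip()
def pvFilterStrip (l : List Char) : String :=
  String.ofList (PySem.Chars.strip (l.filter pvValid))

def strip_invalid (term : String) : String :=
  -- str.count('-') of a single-character needle = the number of '-' characters (exact)
  let cnt := term.toList.count '-'
  if cnt ≠ 0 then
    if term.toList.length = cnt then ""
    else if cnt = 1 then pvFilterStrip term.toList
    else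
      match PySem.List.index? term.toList '-' with
      | some ind => pvFilterStrip (pvLoopA term.toList ind)
      | none => pvFilterStrip term.toList   -- unreachable: cnt ≥ 2 means '-' ∈ term
  else pvFilterStrip term.toList

-- ===== PORT B =====
-- c.isalpha() or c in " '-"
def pvValidB (c : Char) : Bool :=
  PySem.Chars.isalpha c || (" '-".toList).contains c

-- the single pass: after a kept '-', drop characters until the next alphabetic one
def pvPass : List Char → Bool → List Char
  | [], _ => []
  | c :: cs, true => if PySem.Chars.isalpha c then c :: pvPass cs false else pvPass cs true
  | c :: cs, false => c :: pvPass cs (c == '-')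

def strip_invalid_alt (term : String) : String :=
  let l := term.toList
  let n := l.count '-'
  if n ≠ 0 ∧ n = l.length then ""
  else
    let s := if 2 ≤ n then pvPass l false else l
    String.ofList (PySem.Chars.strip (s.filter pvValidB))

-- ===== PRECONDITION & SPEC =====
def Spec_strip_invalid (term : String) (out : String) : Prop := out = strip_invalid_alt term
instance (term : String) (out : String) : Decidable (Spec_strip_invalid term out) := by unfold Spec_strip_invalid; infer_instance

-- ===== CLAIM (what is proved, stated in full; the proofs are below) =====
def Claim_equal_strip_invalid : Prop := ∀ (term : String), Dom_strip_invalid term → Spec_strip_invalid term (strip_invalid term)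

-- ===== LEMMAS AND PROOFS =====

theorem pvValidB_eq (c : Char) : pvValidB c = pvValid c := by
  simp [pvValidB, pvValid]

theorem pvPass_no_hyphen (s : List Char) (h : '-' ∉ s) : pvPass s false = s := by
  induction s with
  | nil => rfl
  | cons a t ih =>
    simp only [List.mem_cons, not_or] at h
    simp [pvPass, ih h.2, beq_eq_false_iff_ne.mpr (Ne.symm h.1)]

theorem pvPass_split (s t : List Char) (h : '-' ∉ s) :
    pvPass (s ++ '-' :: t) false = s ++ '-' :: pvPass t true := by
  induction s with
  | nil => simp [pvPass]
  | cons a u ih =>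
    simp only [List.mem_cons, not_or] at h
    simp [pvPass, beq_eq_false_iff_ne.mpr (Ne.symm h.1), ih h.2]

theorem hyphen_not_alpha : PySem.Chars.isalpha '-' = false := by decide

theorem pvLoopA_eq (l : List Char) (ind : Nat) :
    pvLoopA l ind = l.take (ind + 1) ++ pvPass (l.drop (ind + 1)) true := by
  induction l, ind using pvLoopA.induct with
  | case1 l ind h halpha ih =>
    have he : l.eraseIdx (ind + 1) = l.take (ind + 1) ++ l.drop (ind + 2) :=
      List.eraseIdx_eq_take_drop_succ l (ind + 1)
    have hlen : (l.take (ind + 1)).length = ind + 1 := by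
      simp [List.length_take]; omega
    have hdropc : l.drop (ind + 1) = l[ind + 1] :: l.drop (ind + 2) :=
      List.drop_eq_getElem_cons h
    rw [pvLoopA, dif_pos h, if_pos halpha, ih, he,
      List.take_left' hlen, List.drop_left' hlen, hdropc]
    simp [pvPass, halpha]
  | case2 l ind h halpha j hidx ih =>
    rw [pvLoopA, dif_pos h, if_neg (by simp [halpha]), hidx]
    show pvLoopA l j = _
    rw [ih]
    -- unpack the found index
    obtain ⟨k, hk, rfl⟩ := Option.map_eq_some_iff.mp hidx
    obtain ⟨pre, suf, hsplit, hklen, hpre⟩ := (PySem.List.index?_eq_some_iff (l.drop (ind + 1)) '-' k).mp hk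
    have hc : l.drop (ind + 1) = l[ind + 1] :: l.drop (ind + 2) :=
      List.drop_eq_getElem_cons h
    have hcalpha : PySem.Chars.isalpha l[ind + 1] = true := by
      cases hb : PySem.Chars.isalpha l[ind + 1] with
      | false => exact absurd hb (by simp [halpha])
      | true => rfl
    -- pre is nonempty: its head is the alphabetic char l[ind+1] ≠ '-'
    have hcne : l[ind + 1] ≠ '-' := by
      intro hEq; rw [hEq] at hcalpha; simp [hyphen_not_alpha] at hcalpha
    obtain ⟨pre', rfl⟩ : ∃ pre', pre = l[ind + 1] :: pre' := by
      cases pre with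
      | nil => exfalso; rw [hc] at hsplit; exact hcne (List.cons_eq_cons.mp hsplit).1
      | cons a pre' =>
        rw [hc] at hsplit
        exact ⟨pre', by rw [(List.cons_eq_cons.mp hsplit).1]⟩
    simp only [List.mem_cons, not_or] at hpre
    -- left side: pvPass (drop (ind+1)) true
    have hd : l.drop (ind + 2) = pre' ++ '-' :: suf := by
      rw [hc] at hsplit; exact (List.cons_eq_cons.mp hsplit).2
    have hleft : pvPass (l.drop (ind + 1)) true
        = l[ind + 1] :: pre' ++ '-' :: pvPass suf true := by
      rw [hc, hd]
      simp [pvPass, hcalpha, pvPass_split pre' suf hpre.2]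
    -- right side pieces
    have hlen' : pre'.length + 1 = k := by simpa using hklen
    have hlen' : pre'.length + 1 = k := by simpa using hklen
    have hsplit' : l[ind + 1] :: (pre' ++ '-' :: suf) = (l[ind + 1] :: pre' ++ ['-']) ++ suf := by
      simp
    have hlen2 : (l[ind + 1] :: pre' ++ ['-']).length = k + 1 := by
      simp only [List.cons_append, List.length_cons, List.length_append,
        List.length_nil]
      omega
    have htake : l.take (k + (ind + 1) + 1)
        = l.take (ind + 1) ++ (l[ind + 1] :: pre' ++ ['-']) := by
      rw [show k + (ind + 1) + 1 = (ind + 1) + (k + 1) by omega, List.take_add, hc, hd]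
      congr 1
      rw [hsplit', List.take_left' hlen2]
    have hdrop : l.drop (k + (ind + 1) + 1) = suf := by
      rw [show k + (ind + 1) + 1 = (ind + 1) + (k + 1) by omega, ← List.drop_drop, hc, hd]
      rw [hsplit', List.drop_left' hlen2]
    rw [htake, hdrop, hleft]
    simp
  | case3 l ind h halpha hidx =>
    rw [pvLoopA, dif_pos h, if_neg (by simp [halpha]), hidx]
    show l = _
    have hnone : '-' ∉ l.drop (ind + 1) :=
      (PySem.List.index?_eq_none_iff (l.drop (ind + 1)) '-').mp (by
        simpa [pvIndexFrom, Option.map_eq_none_iff] using hidx)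
    have hc : l.drop (ind + 1) = l[ind + 1] :: l.drop (ind + 2) :=
      List.drop_eq_getElem_cons h
    have hcalpha : PySem.Chars.isalpha l[ind + 1] = true := by
      cases hb : PySem.Chars.isalpha l[ind + 1] with
      | false => exact absurd hb (by simp [halpha])
      | true => rfl
    rw [hc] at hnone ⊢
    simp only [List.mem_cons, not_or] at hnone
    simp [pvPass, hcalpha, pvPass_no_hyphen _ hnone.2, ← hc]
  | case4 l ind h =>
    rw [pvLoopA, dif_neg h]
    have : l.drop (ind + 1) = [] := List.drop_eq_nil_of_le (by omega)
    simp [this, pvPass, List.take_of_length_le (by omega : l.length ≤ ind + 1)]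

theorem filter_eq (l : List Char) : l.filter pvValidB = l.filter pvValid :=
  List.filter_congr (fun c _ => pvValidB_eq c)

-- ===== VERDICT (by name: the statement is the Claim_ definition above) =====
theorem strip_invalid_spec : Claim_equal_strip_invalid := by
  intro term _
  unfold Spec_strip_invalid strip_invalid strip_invalid_alt
  simp only []
  cases hind : PySem.List.index? term.toList '-' with
  | none =>
    have h0 : term.toList.count '-' = 0 :=
      List.count_eq_zero.mpr ((PySem.List.index?_eq_none_iff term.toList '-').mp hind)
    rw [h0]
    simp [pvFilterStrip, filter_eq]
  | some ind =>
    obtain ⟨hk, hv, -⟩ := PySem.List.getElem_of_index?_eq_some hind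
    have hmem : '-' ∈ term.toList := hv ▸ List.getElem_mem hk
    have h0 : 0 < term.toList.count '-' := List.count_pos_iff.mpr hmem
    have hc1 : term.toList.count '-' ≠ 0 := by omega
    have hloop : pvLoopA term.toList ind = pvPass term.toList false := by
      obtain ⟨pre, suf, hsplit, hplen, hpre⟩ :=
        (PySem.List.index?_eq_some_iff term.toList '-' ind).mp hind
      rw [pvLoopA_eq, hsplit, pvPass_split pre suf hpre]
      have h1 : (pre ++ '-' :: suf).take (ind + 1) = pre ++ ['-'] := by
        rw [show pre ++ '-' :: suf = (pre ++ ['-']) ++ suf by simp]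
        rw [show ind + 1 = (pre ++ ['-']).length by simp [hplen]]
        rw [List.take_left]
      have h2 : (pre ++ '-' :: suf).drop (ind + 1) = suf := by
        rw [show pre ++ '-' :: suf = (pre ++ ['-']) ++ suf by simp]
        rw [show ind + 1 = (pre ++ ['-']).length by simp [hplen]]
        rw [List.drop_left]
      rw [h1, h2]; simp
    by_cases hall : term.toList.count '-' = term.toList.length
    · have hB : term.toList.count '-' ≠ 0 ∧ term.toList.count '-' = term.toList.length :=
        ⟨hc1, hall⟩
      rw [if_pos hc1, if_pos hall.symm, if_pos hB]
    · have hB : ¬(term.toList.count '-' ≠ 0 ∧ term.toList.count '-' = term.toList.length) :=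
        fun h => hall h.2
      have hlen : ¬ term.toList.length = term.toList.count '-' := fun h => hall h.symm
      by_cases h1 : term.toList.count '-' = 1
      · have h2 : ¬ 2 ≤ term.toList.count '-' := by omega
        rw [if_pos hc1, if_neg hlen, if_pos h1, if_neg hB, if_neg h2, filter_eq]; rfl
      · have h2 : 2 ≤ term.toList.count '-' := by omega
        rw [if_pos hc1, if_neg hlen, if_neg h1, if_neg hB, if_pos h2]
        show pvFilterStrip (pvLoopA term.toList ind) = _
        rw [hloop, filter_eq]; rfl
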